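-- pv_equiv track=rewrite | github.com/jjangsungwon/Algorithm | python/2630.py | solution
-- ===== SOURCE A (Python) =====
-- def solution(arr):
--     result = []
--
--     size = len(arr) // 2
--     quadrant_1 = []
--     for i in range(size):
--         quadrant_1.append(arr[i][:size])
--
--     quadrant_2 = []
--     for i in range(size):
--         quadrant_2.append(arr[i][size:])
--
--     quadrant_3 = []
--     for i in range(size, len(arr)):
--         quadrant_3.append(arr[i][:size])
--
--     quadrant_4 = []
--     for i in range(size, len(arr)):
--         quadrant_4.append(arr[i][size:])
--
--     result.append(quadrant_1)
--     result.append(quadrant_2)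
--     result.append(quadrant_3)
--     result.append(quadrant_4)
--
--     return result
-- ===== SOURCE B (Python) =====
-- def solution(arr):
--     size = len(arr) // 2
--     q1, q2, q3, q4 = [], [], [], []
--     for i, row in enumerate(arr):
--         left, right = row[:size], row[size:]
--         if i < size:
--             q1.append(left)
--             q2.append(right)
--         else:
--             q3.append(left)
--             q4.append(right)
--     return [q1, q2, q3, q4]
-- ===== Notes on version B (the rewrite author's own statement) =====
-- stated objective: alternative
-- what changed: Replaces A's four separate index-driven region passes (one loop per quadrant, each re-indexing arr[i]) with a single enumerate pass that splits each row once at size and scatters the two halves to the top or bottom quadrant pair.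
import Mathlib
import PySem

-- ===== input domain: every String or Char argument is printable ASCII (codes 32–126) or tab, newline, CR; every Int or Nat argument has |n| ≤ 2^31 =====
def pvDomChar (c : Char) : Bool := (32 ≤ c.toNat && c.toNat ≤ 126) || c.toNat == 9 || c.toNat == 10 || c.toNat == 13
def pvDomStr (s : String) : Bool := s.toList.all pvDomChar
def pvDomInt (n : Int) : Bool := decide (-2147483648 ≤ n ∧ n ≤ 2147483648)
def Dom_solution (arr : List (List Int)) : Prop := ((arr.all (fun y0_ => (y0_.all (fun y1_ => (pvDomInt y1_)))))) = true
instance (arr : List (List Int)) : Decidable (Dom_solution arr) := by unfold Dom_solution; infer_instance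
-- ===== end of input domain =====

-- B replaces A's four index-driven region loops with a single enumerate pass that
-- splits each row once and scatters the halves to the right quadrant pair (alternative decomposition, same cost).


-- ===== PORT A =====
def solution (arr : List (List Int)) : List (List (List Int)) :=
  let result : List (List (List Int)) := []
  let size : Int := PySem.Int.floordiv (PySem.List.len arr) 2
  let quadrant_1 := (PySem.List.pyRange 0 size 1).foldl
    (fun acc i => acc ++ [PySem.List.slice (PySem.List.pyGetD arr i []) none (some size)]) []
  let quadrant_2 := (PySem.List.pyRange 0 size 1).foldl
    (fun acc i => acc ++ [PySem.List.slice (PySem.List.pyGetD arr i []) (some size) none]) []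
  let quadrant_3 := (PySem.List.pyRange size (PySem.List.len arr) 1).foldl
    (fun acc i => acc ++ [PySem.List.slice (PySem.List.pyGetD arr i []) none (some size)]) []
  let quadrant_4 := (PySem.List.pyRange size (PySem.List.len arr) 1).foldl
    (fun acc i => acc ++ [PySem.List.slice (PySem.List.pyGetD arr i []) (some size) none]) []
  let result := result ++ [quadrant_1]
  let result := result ++ [quadrant_2]
  let result := result ++ [quadrant_3]
  let result := result ++ [quadrant_4]
  result

-- ===== PORT B =====
def solution_alt (arr : List (List Int)) : List (List (List Int)) :=
  let size : Int := PySem.Int.floordiv (PySem.List.len arr) 2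
  let st := (PySem.List.enumerate arr 0).foldl
    (fun (q : List (List Int) × List (List Int) × List (List Int) × List (List Int)) p =>
      let left := PySem.List.slice p.2 none (some size)
      let right := PySem.List.slice p.2 (some size) none
      if p.1 < size then (q.1 ++ [left], q.2.1 ++ [right], q.2.2.1, q.2.2.2)
      else (q.1, q.2.1, q.2.2.1 ++ [left], q.2.2.2 ++ [right]))
    ([], [], [], [])
  [st.1, st.2.1, st.2.2.1, st.2.2.2]

-- ===== PRECONDITION & SPEC =====
def Spec_solution (arr : List (List Int)) (out : List (List (List Int))) : Prop := out = solution_alt arr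
instance (arr : List (List Int)) (out : List (List (List Int))) : Decidable (Spec_solution arr out) := by unfold Spec_solution; infer_instance

-- ===== CLAIM (what is proved, stated in full; the proofs are below) =====
def Claim_equal_solution : Prop := ∀ (arr : List (List Int)), Dom_solution arr → Spec_solution arr (solution arr)

-- ===== LEMMAS AND PROOFS =====

-- A's "for i in range(k): acc.append(f(arr[i]))" builds (arr.take k).map f (k ≤ len).
lemma rangeTake_map (xs : List (List Int)) (k : Nat) (hk : k ≤ xs.length)
    (a? b? : Option Int) :
    (PySem.List.pyRange 0 (k : Int) 1).map
        (fun i => PySem.List.slice (PySem.List.pyGetD xs i ([] : List Int)) a? b?)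
      = (xs.take k).map (fun r => PySem.List.slice r a? b?) := by
  rw [PySem.List.pyRange_one]
  simp only [List.map_map]
  apply List.ext_getElem
  · simpa using hk
  · intro j h1 h2
    have hj : j < k := by simpa using h1
    simp [Function.comp, PySem.List.pyGetD_natCast, List.getD,
      List.getElem?_eq_getElem (lt_of_lt_of_le hj hk)]

-- A's bottom loops: "for i in range(k, len(xs)): acc.append(f(xs[i]))" builds (xs.drop k).map f.
lemma rangeDrop_map (xs : List (List Int)) (k : Nat)
    (a? b? : Option Int) :
    (PySem.List.pyRange (k : Int) (PySem.List.len xs) 1).map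
        (fun i => PySem.List.slice (PySem.List.pyGetD xs i ([] : List Int)) a? b?)
      = (xs.drop k).map (fun r => PySem.List.slice r a? b?) := by
  have h := PySem.List.map_pyGetD_pyRange (xs := xs) (a := (k : Int)) (d := ([] : List Int))
    (by positivity)
  calc (PySem.List.pyRange (k : Int) (PySem.List.len xs) 1).map
        (fun i => PySem.List.slice (PySem.List.pyGetD xs i ([] : List Int)) a? b?)
      = ((PySem.List.pyRange (k : Int) (PySem.List.len xs) 1).map
          (fun i => PySem.List.pyGetD xs i ([] : List Int))).map
          (fun r => PySem.List.slice r a? b?) := by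
        rw [List.map_map]; rfl
    _ = (xs.drop k).map (fun r => PySem.List.slice r a? b?) := by rw [h]; simp

-- Invariant of B's single enumerate pass.
lemma bfold (size : Int) (xs : List (List Int)) (k : Int)
    (q1 q2 q3 q4 : List (List Int)) :
    (PySem.List.enumerate xs k).foldl
      (fun (q : List (List Int) × List (List Int) × List (List Int) × List (List Int)) p =>
        let left := PySem.List.slice p.2 none (some size)
        let right := PySem.List.slice p.2 (some size) none
        if p.1 < size then (q.1 ++ [left], q.2.1 ++ [right], q.2.2.1, q.2.2.2)
        else (q.1, q.2.1, q.2.2.1 ++ [left], q.2.2.2 ++ [right]))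
      (q1, q2, q3, q4)
    = (q1 ++ ((xs.take (size - k).toNat).map (fun r => PySem.List.slice r none (some size))),
       q2 ++ ((xs.take (size - k).toNat).map (fun r => PySem.List.slice r (some size) none)),
       q3 ++ ((xs.drop (size - k).toNat).map (fun r => PySem.List.slice r none (some size))),
       q4 ++ ((xs.drop (size - k).toNat).map (fun r => PySem.List.slice r (some size) none))) := by
  induction xs generalizing k q1 q2 q3 q4 with
  | nil => simp [PySem.List.enumerate_nil]
  | cons x xs ih =>
    rw [PySem.List.enumerate_cons, List.foldl_cons]
    by_cases hk : k < size
    · have ht : (size - k).toNat = (size - (k + 1)).toNat + 1 := by omega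
      simp only [hk, if_pos, ih (k + 1), ht, List.take_succ_cons]
      have hd : ((x :: xs).drop ((size - (k+1)).toNat + 1)) = xs.drop (size - (k+1)).toNat := by
        simp
      simp [hd, List.append_assoc]
    · have h0 : (size - k).toNat = 0 := by omega
      have h1 : (size - (k + 1)).toNat = 0 := by omega
      simp only [hk, if_neg, not_false_iff, ih (k + 1), h0, h1]
      simp [List.append_assoc]

lemma solution_eq_alt (arr : List (List Int)) : solution arr = solution_alt arr := by
  unfold solution solution_alt
  have hm : PySem.Int.floordiv (PySem.List.len arr) 2 = ((arr.length / 2 : Nat) : Int) := by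
    simp
  have hle : arr.length / 2 ≤ arr.length := Nat.div_le_self _ _
  simp only [hm]
  rw [bfold]
  simp only [PySem.List.foldl_append_singleton_eq_map, List.nil_append]
  simp only [rangeTake_map arr (arr.length / 2) hle, rangeDrop_map arr (arr.length / 2)]
  simp
  omega

-- ===== VERDICT (by name: the statement is the Claim_ definition above) =====
theorem solution_spec : Claim_equal_solution := by
  intro arr _
  unfold Spec_solution
  exact solution_eq_alt arr
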